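-- pv_equiv track=rewrite | github.com/AshenHermit/mirea-homework | tools/computer_science/report_generator/lib/utils.py | split_by_spaces
-- ===== SOURCE A (Python) =====
-- def split_by_spaces(text):
--     carret_state = 0
--     breaks = []
--     for i in range(len(text)):
--         if text[i] == "<":
--             carret_state = 1
--         elif text[i] == ">":
--             if text[i-1] == "/":
--                 carret_state = 0
--             if carret_state == 2:
--                 carret_state = 0
--         elif text[i] == "/" and text[i-1] == "<":
--             carret_state = 2
--         elif carret_state==0 and (text[i] == " " or text[i] == "\t" or text[i] == "\n"):
--             breaks.append(i)
--
--     elements = []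
--     for i in range(len(breaks)+1):
--         if i==0: start = -1
--         else: start = breaks[i-1]
--         if i==len(breaks): end = len(text)
--         else: end = breaks[i]
--         elements.append(text[start+1:end])
--     return elements
-- ===== SOURCE B (Python) =====
-- def split_by_spaces(text):
--     # Single pass: same tag state machine, but accumulate the current token
--     # in a buffer instead of recording break indices and re-slicing.
--     carret_state = 0
--     elements = []
--     buf = []
--     for i in range(len(text)):
--         c = text[i]
--         if c == "<":
--             carret_state = 1
--             buf.append(c)
--         elif c == ">":
--             if text[i-1] == "/":
--                 carret_state = 0
--             if carret_state == 2:
--                 carret_state = 0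
--             buf.append(c)
--         elif c == "/" and text[i-1] == "<":
--             carret_state = 2
--             buf.append(c)
--         elif carret_state == 0 and (c == " " or c == "\t" or c == "\n"):
--             elements.append("".join(buf))
--             buf = []
--         else:
--             buf.append(c)
--     elements.append("".join(buf))
--     return elements
-- ===== Notes on version B (the rewrite author's own statement) =====
-- stated objective: simpler
-- what changed: Single pass that accumulates the current token in a buffer and emits it at each break, replacing A's two-phase break-index recording plus slicing loop.
import Mathlib
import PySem

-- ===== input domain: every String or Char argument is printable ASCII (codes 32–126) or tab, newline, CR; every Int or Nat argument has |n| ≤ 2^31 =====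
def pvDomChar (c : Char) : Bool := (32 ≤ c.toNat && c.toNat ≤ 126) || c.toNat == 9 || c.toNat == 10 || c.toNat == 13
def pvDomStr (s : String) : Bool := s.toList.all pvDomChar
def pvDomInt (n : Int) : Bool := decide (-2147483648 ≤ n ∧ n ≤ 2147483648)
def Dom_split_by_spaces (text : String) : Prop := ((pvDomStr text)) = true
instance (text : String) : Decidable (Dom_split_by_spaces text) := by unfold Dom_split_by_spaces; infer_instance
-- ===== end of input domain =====

-- B is a single pass accumulating the current token instead of A's break-index list + slicing loop (objective: simpler).

-- ===== PORT A =====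
-- one iteration of A's first loop: state is (carret_state, breaks)
def aStep (cs : List Char) (s : Int × List Int) (i : Int) : Int × List Int :=
  let c := PySem.List.pyGetD cs i ' '
  if c = '<' then (1, s.2)
  else if c = '>' then
    let st1 := if PySem.List.pyGetD cs (i-1) ' ' = '/' then 0 else s.1
    (if st1 = 2 then 0 else st1, s.2)
  else if c = '/' ∧ PySem.List.pyGetD cs (i-1) ' ' = '<' then (2, s.2)
  else if s.1 = 0 ∧ (c = ' ' ∨ c = '\t' ∨ c = '\n') then (s.1, s.2 ++ [i])
  else s

-- body of A's second loop: the element text[start+1:end] appended for index i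
def aElem (cs : List Char) (n : Int) (breaks : List Int) (i : Int) : String :=
  let start : Int := if i = 0 then -1 else PySem.List.pyGetD breaks (i-1) 0
  let e : Int := if i = (breaks.length : Int) then n else PySem.List.pyGetD breaks i 0
  String.ofList (PySem.List.slice cs (some (start+1)) (some e))

def split_by_spaces (text : String) : List String :=
  let cs := text.toList
  let n : Int := cs.length
  let breaks := ((PySem.List.pyRange 0 n 1).foldl (aStep cs) (0, [])).2
  (PySem.List.pyRange 0 ((breaks.length : Int) + 1) 1).foldl
    (fun elements i => elements ++ [aElem cs n breaks i]) []

-- ===== PORT B =====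
-- one iteration of B's single loop: state is (carret_state, buf, elements)
def bStep (cs : List Char) (s : Int × List Char × List (List Char)) (i : Int) :
    Int × List Char × List (List Char) :=
  let c := PySem.List.pyGetD cs i ' '
  if c = '<' then (1, s.2.1 ++ [c], s.2.2)
  else if c = '>' then
    let st1 := if PySem.List.pyGetD cs (i-1) ' ' = '/' then 0 else s.1
    (if st1 = 2 then 0 else st1, s.2.1 ++ [c], s.2.2)
  else if c = '/' ∧ PySem.List.pyGetD cs (i-1) ' ' = '<' then (2, s.2.1 ++ [c], s.2.2)
  else if s.1 = 0 ∧ (c = ' ' ∨ c = '\t' ∨ c = '\n') then (s.1, [], s.2.2 ++ [s.2.1])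
  else (s.1, s.2.1 ++ [c], s.2.2)

def split_by_spaces_alt (text : String) : List String :=
  let cs := text.toList
  let r := (PySem.List.pyRange 0 (cs.length : Int) 1).foldl (bStep cs) (0, [], [])
  (r.2.2 ++ [r.2.1]).map String.ofList

-- ===== PRECONDITION & SPEC =====
def Spec_split_by_spaces (text : String) (out : List String) : Prop := out = split_by_spaces_alt text
instance (text : String) (out : List String) : Decidable (Spec_split_by_spaces text out) := by unfold Spec_split_by_spaces; infer_instance

-- ===== CLAIM (what is proved, stated in full; the proofs are below) =====
def Claim_equal_split_by_spaces : Prop := ∀ (text : String), Dom_split_by_spaces text → Spec_split_by_spaces text (split_by_spaces text)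

-- ===== LEMMAS AND PROOFS =====

-- the slices text[prev+1:b1], text[b1+1:b2], …, text[blast+1:stop]
def pieces (cs : List Char) (prev stop : Int) : List Int → List (List Char)
  | [] => [PySem.List.slice cs (some (prev+1)) (some stop)]
  | b :: rest => PySem.List.slice cs (some (prev+1)) (some b) :: pieces cs b stop rest

def appendLast (c : Char) : List (List Char) → List (List Char)
  | [] => [[c]]
  | [y] => [y ++ [c]]
  | y :: z :: rest => y :: appendLast c (z :: rest)

theorem pieces_ne_nil (cs : List Char) (prev stop : Int) (brks : List Int) :
    pieces cs prev stop brks ≠ [] := by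
  cases brks <;> simp [pieces]

theorem appendLast_cons (c : Char) (y : List Char) (ys : List (List Char)) (h : ys ≠ []) :
    appendLast c (y :: ys) = y :: appendLast c ys := by
  cases ys with
  | nil => exact absurd rfl h
  | cons z rest => rfl

theorem appendLast_snoc (c : Char) (ys : List (List Char)) (y : List Char) :
    appendLast c (ys ++ [y]) = ys ++ [y ++ [c]] := by
  induction ys with
  | nil => rfl
  | cons z rest ih =>
      rw [List.cons_append, appendLast_cons c z (rest ++ [y]) (by simp), ih]; simp

theorem slice_extend (cs : List Char) (a : Int) (k : Nat) (hk : k < cs.length)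
    (ha0 : 0 ≤ a) (hak : a ≤ (k : Int)) :
    PySem.List.slice cs (some a) (some ((k : Int) + 1)) =
      PySem.List.slice cs (some a) (some (k : Int)) ++ [cs[k]] := by
  rw [PySem.List.slice_toNat cs ha0 (by omega), PySem.List.slice_toNat cs ha0 (by omega)]
  have h1 : ((k : Int) + 1).toNat = k + 1 := by omega
  have h2 : ((k : Int)).toNat = k := by omega
  have h4 : k + 1 - a.toNat = (k - a.toNat) + 1 := by omega
  rw [h1, h2, h4, List.take_succ, List.getElem?_drop]
  have h5 : a.toNat + (k - a.toNat) = k := by omega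
  rw [h5, List.getElem?_eq_getElem hk]
  simp

theorem pieces_extend (cs : List Char) (k : Nat) (hk : k < cs.length) :
    ∀ (brks : List Int) (prev : Int), -1 ≤ prev → prev < (k : Int) →
    (∀ b ∈ brks, -1 ≤ b ∧ b < (k : Int)) →
    pieces cs prev ((k : Int) + 1) brks = appendLast cs[k] (pieces cs prev (k : Int) brks) := by
  intro brks
  induction brks with
  | nil =>
      intro prev h1 h2 _
      simp only [pieces, appendLast]
      rw [slice_extend cs (prev + 1) k hk (by omega) (by omega)]
  | cons b rest ih =>
      intro prev h1 h2 hb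
      obtain ⟨hb1, hb2⟩ := hb b (by simp)
      simp only [pieces]
      rw [appendLast_cons _ _ _ (pieces_ne_nil cs b (k : Int) rest),
        ih b hb1 hb2 (fun x hx => hb x (by simp [hx]))]

theorem pieces_snoc (cs : List Char) :
    ∀ (brks : List Int) (prev b stop : Int),
    pieces cs prev stop (brks ++ [b]) =
      pieces cs prev b brks ++ [PySem.List.slice cs (some (b + 1)) (some stop)] := by
  intro brks
  induction brks with
  | nil => intro prev b stop; simp [pieces]
  | cons x rest ih => intro prev b stop; simp [pieces, ih]

theorem invMain (cs : List Char) : ∀ (k : Nat), k ≤ cs.length →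
    ((PySem.List.pyRange 0 (k : Int) 1).foldl (bStep cs) (0, [], [])).1 =
      ((PySem.List.pyRange 0 (k : Int) 1).foldl (aStep cs) (0, [])).1 ∧
    (∀ b ∈ ((PySem.List.pyRange 0 (k : Int) 1).foldl (aStep cs) (0, [])).2,
      0 ≤ b ∧ b < (k : Int)) ∧
    ((PySem.List.pyRange 0 (k : Int) 1).foldl (bStep cs) (0, [], [])).2.2 ++
        [((PySem.List.pyRange 0 (k : Int) 1).foldl (bStep cs) (0, [], [])).2.1] =
      pieces cs (-1) (k : Int)
        ((PySem.List.pyRange 0 (k : Int) 1).foldl (aStep cs) (0, [])).2 := by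
  intro k
  induction k with
  | zero =>
      intro _
      refine ⟨rfl, by simp [PySem.List.pyRange_one_eq_nil], ?_⟩
      rw [PySem.List.pyRange_one_eq_nil (by omega)]
      simp only [List.foldl_nil, pieces]
      rw [show ((-1 : Int) + 1) = ((0 : Nat) : Int) by omega]
      rw [PySem.List.slice_natCast]
      simp
  | succ k ih =>
      intro hk
      have hklt : k < cs.length := hk
      obtain ⟨ih1, ih2, ih3⟩ := ih (Nat.le_of_succ_le hk)
      have hr : PySem.List.pyRange 0 (((k + 1 : Nat)) : Int) 1 =
          PySem.List.pyRange 0 (k : Int) 1 ++ [(k : Int)] := by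
        rw [show (((k + 1 : Nat)) : Int) = (k : Int) + 1 by push_cast; ring]
        exact PySem.List.pyRange_one_succ_right (by positivity)
      rw [hr]
      simp only [List.foldl_append, List.foldl_cons, List.foldl_nil]
      set A := (PySem.List.pyRange 0 (k : Int) 1).foldl (aStep cs) (0, []) with hA
      set B := (PySem.List.pyRange 0 (k : Int) 1).foldl (bStep cs) (0, [], []) with hB
      have hc : PySem.List.pyGetD cs (k : Int) ' ' = cs[k] := by
        rw [PySem.List.pyGetD_natCast]
        simp [List.getD, List.getElem?_eq_getElem hklt]
      have hcast : (((k + 1 : Nat)) : Int) = (k : Int) + 1 := by push_cast; ring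
      have hext : ∀ (ch : Char), ch = cs[k] →
          B.2.2 ++ [B.2.1 ++ [ch]] = pieces cs (-1) (((k + 1 : Nat)) : Int) A.2 := by
        intro ch hch
        rw [hcast, pieces_extend cs k hklt A.2 (-1) (by omega) (by omega)
          (fun b hb => ⟨by linarith [(ih2 b hb).1], (ih2 b hb).2⟩), ← ih3,
          appendLast_snoc, hch]
      have hbnd : ∀ b ∈ A.2, 0 ≤ b ∧ b < (((k + 1 : Nat)) : Int) := by
        intro b hb
        obtain ⟨h1, h2⟩ := ih2 b hb
        constructor <;> omega
      simp only [aStep, bStep, ih1]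
      split_ifs <;>
        dsimp only <;>
        refine ⟨rfl, ?_, ?_⟩ <;>
        first
          | exact hbnd
          | (simp only [hc]; exact hext _ rfl)
          | (intro b hb
             rw [List.mem_append] at hb
             rcases hb with hb | hb
             · obtain ⟨x1, x2⟩ := ih2 b hb; constructor <;> omega
             · simp at hb; subst hb; constructor <;> omega)
          | (rw [hcast, pieces_snoc, ← ih3]
             have hz : PySem.List.slice cs (some ((k : Int) + 1)) (some ((k : Int) + 1)) = [] := by
               rw [PySem.List.slice_toNat cs (by omega) (by omega)]; simp
             simp [hz])

theorem start_at (pre brks : List Int) (prev : Int)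
    (h0 : pre = [] → prev = -1) (hl : ∀ h : pre ≠ [], pre.getLast h = prev) :
    (if ((pre.length : Nat) : Int) = 0 then (-1 : Int)
      else PySem.List.pyGetD (pre ++ brks) (((pre.length : Nat) : Int) - 1) 0) = prev := by
  cases pre with
  | nil => simp [h0 rfl]
  | cons x xs =>
      have hne : (x :: xs) ≠ [] := by simp
      rw [if_neg (by simp only [List.length_cons]; push_cast; omega)]
      have h1 : (((x :: xs).length : Nat) : Int) - 1 = ((xs.length : Nat) : Int) := by
        simp [List.length_cons]
      have hlen : xs.length < (x :: xs).length := by simp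
      rw [h1, PySem.List.pyGetD_natCast, List.getD_eq_getElem?_getD,
        List.getElem?_append_left hlen, List.getElem?_eq_getElem hlen]
      have h2 := hl hne
      rw [List.getLast_eq_getElem hne] at h2
      simpa using h2

theorem secondLoop_eq (cs : List Char) (n : Int) :
    ∀ (brks pre : List Int) (prev : Int),
    (pre = [] → prev = -1) → (∀ h : pre ≠ [], pre.getLast h = prev) →
    (List.range (brks.length + 1)).map
        (fun k => aElem cs n (pre ++ brks) ((pre.length + k : Nat) : Int))
      = (pieces cs prev n brks).map String.ofList := by
  intro brks
  induction brks with
  | nil =>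
      intro pre prev h0 hl
      have hr : List.range (([] : List Int).length + 1) = [0] := by simp
      rw [hr, List.map_cons, List.map_nil]
      simp only [pieces, List.map_cons, List.map_nil]
      unfold aElem
      simp only [Nat.add_zero]
      rw [start_at pre [] prev h0 hl]
      rw [if_pos (by simp)]
  | cons b rest ih =>
      intro pre prev h0 hl
      have hlen : (b :: rest).length + 1 = (rest.length + 1) + 1 := by simp
      rw [hlen, List.range_succ_eq_map, List.map_cons, List.map_map]
      have hhead : aElem cs n (pre ++ b :: rest) ((pre.length + 0 : Nat) : Int) =
          String.ofList (PySem.List.slice cs (some (prev + 1)) (some b)) := by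
        unfold aElem
        rw [Nat.add_zero, start_at pre (b :: rest) prev h0 hl]
        rw [if_neg (by simp [List.length_append]; omega)]
        have hb : PySem.List.pyGetD (pre ++ b :: rest) ((pre.length : Nat) : Int) 0 = b := by
          rw [PySem.List.pyGetD_natCast, List.getD_eq_getElem?_getD,
            List.getElem?_append_right (le_refl pre.length)]
          simp
        rw [hb]
      have htail : (List.range (rest.length + 1)).map
            ((fun k => aElem cs n (pre ++ b :: rest) ((pre.length + k : Nat) : Int)) ∘ Nat.succ)
          = (pieces cs b n rest).map String.ofList := by
        rw [← ih (pre ++ [b]) b (by simp) (fun h => List.getLast_concat)]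
        apply List.map_congr_left
        intro k hk
        simp only [Function.comp]
        have h1 : pre.length + (Nat.succ k) = (pre ++ [b]).length + k := by
          simp [List.length_append]; omega
        rw [h1, List.append_assoc, List.singleton_append]
      rw [hhead, htail]
      simp [pieces]

-- ===== VERDICT (by name: the statement is the Claim_ definition above) =====
theorem split_by_spaces_spec : Claim_equal_split_by_spaces := by
  unfold Claim_equal_split_by_spaces Spec_split_by_spaces
  intro text _
  simp only [split_by_spaces, split_by_spaces_alt]
  obtain ⟨ih1, ih2, ih3⟩ := invMain text.toList text.toList.length le_rfl
  set cs := text.toList with hcs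
  set A := (PySem.List.pyRange 0 (cs.length : Int) 1).foldl (aStep cs) (0, []) with hA
  set B := (PySem.List.pyRange 0 (cs.length : Int) 1).foldl (bStep cs) (0, [], []) with hB
  rw [PySem.List.foldl_append_singleton_eq_map, List.nil_append, PySem.List.pyRange_one,
    List.map_map]
  have hn : (((A.2.length : Int) + 1) - 0).toNat = A.2.length + 1 := by omega
  rw [hn]
  have hsl := secondLoop_eq cs (cs.length : Int) A.2 [] (-1) (fun _ => rfl)
    (fun h => absurd rfl h)
  simp only [List.nil_append, List.length_nil, Nat.zero_add] at hsl
  have hmap : (List.range (A.2.length + 1)).map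
        (aElem cs (cs.length : Int) A.2 ∘ fun k : Nat => (0 : Int) + k)
      = (List.range (A.2.length + 1)).map (fun k => aElem cs (cs.length : Int) A.2 ((k : Nat) : Int)) := by
    apply List.map_congr_left
    intro k _
    simp [Function.comp]
  rw [hmap, hsl, ← ih3]
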